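-- pv_equiv track=rewrite | github.com/tiendm1991/python | Backtracking/minSizeRec.py | minSizeRec
-- ===== SOURCE A (Python) =====
-- def minSizeRec(arr, k):
--     n = len(arr)
--     mi = n
--     if n < 3:
--         return n
--     for i in range(n-2):
--         if arr[i+1] - arr[i] == k and arr[i+2] - arr[i+1] == k:
--             newArr = arr[:i]
--             if i + 3 < n:
--                 newArr += arr[(i+3):]
--             mi = min(mi, minSizeRec(newArr, k))
--     return mi
-- ===== SOURCE B (Python) =====
-- def minSizeRec(arr, k):
--     # Level-synchronized BFS over deduplicated states: every removal deletes
--     # exactly 3 elements, so the answer is len(arr) - 3 * (number of levels),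
--     # and at most len(arr) // 3 removal levels are ever possible.
--     frontier = {tuple(arr)}
--     size = len(arr)
--     for _ in range(len(arr) // 3):
--         nxt = set()
--         for cur in frontier:
--             for i in range(len(cur) - 2):
--                 if cur[i + 1] - cur[i] == k and cur[i + 2] - cur[i + 1] == k:
--                     nxt.add(cur[:i] + cur[i + 3:])
--         if not nxt:
--             return size
--         size -= 3
--         frontier = nxt
--     return size
-- ===== Notes on version B (the rewrite author's own statement) =====
-- stated objective: alternative
-- what changed: Replaced A's branching tree recursion (one recursive call per removable triple, recomputing shared sub-states) by a level-synchronized BFS over a deduplicated set of intermediate arrays, returning len(arr) - 3 * (number of levels); every removal deletes exactly 3 elements, so the minimum size is determined by the deepest reachable level.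
import Mathlib
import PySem

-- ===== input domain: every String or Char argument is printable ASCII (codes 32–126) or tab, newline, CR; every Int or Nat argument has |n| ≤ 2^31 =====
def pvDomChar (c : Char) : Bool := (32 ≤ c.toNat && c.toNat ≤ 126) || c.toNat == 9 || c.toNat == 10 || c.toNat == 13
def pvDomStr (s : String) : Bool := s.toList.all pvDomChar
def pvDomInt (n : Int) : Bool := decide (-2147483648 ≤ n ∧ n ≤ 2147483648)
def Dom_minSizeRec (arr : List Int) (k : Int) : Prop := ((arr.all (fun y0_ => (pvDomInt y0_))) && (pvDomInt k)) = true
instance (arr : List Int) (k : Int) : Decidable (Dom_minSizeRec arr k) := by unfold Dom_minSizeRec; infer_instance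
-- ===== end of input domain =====

-- B replaces A's branching tree recursion (one recursive call per removable
-- triple, re-exploring shared sub-states) by a level-synchronized BFS over a
-- deduplicated set of intermediate arrays: answer = len - 3 * number of levels.

-- ===== PORT A =====
-- A's 'for i in range(n-2)' loop: recursion over the index list; 'rec' is the
-- recursive call minSizeRec(newArr, k)
def minSizeRecGo (k : Int) (rec : List Int → Int) (arr : List Int) : List Nat → Int → Int
  | [], mi => mi
  | i :: rest, mi =>
    let mi' :=
      if PySem.List.pyGetD arr ((i : Int) + 1) 0 - PySem.List.pyGetD arr (i : Int) 0 = k ∧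
         PySem.List.pyGetD arr ((i : Int) + 2) 0 - PySem.List.pyGetD arr ((i : Int) + 1) 0 = k then
        let newArr :=
          if (i : Int) + 3 < (arr.length : Int) then
            PySem.List.slice arr none (some (i : Int)) ++
              PySem.List.slice arr (some ((i : Int) + 3)) none
          else PySem.List.slice arr none (some (i : Int))
        min mi (rec newArr)
      else mi
    minSizeRecGo k rec arr rest mi'

-- A: for each i with arr[i+1]-arr[i] == k == arr[i+2]-arr[i+1], recurse on the
-- array with that triple removed; mi = min over all branches (init n).  The
-- fuel argument is only a totality guard: each recursive call removes 3
-- elements, so the initial fuel len(arr) + 1 (see minSizeRec) never runs out.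
def minSizeRecF (k : Int) : Nat → List Int → Int
  | 0, arr => (arr.length : Int)
  | fuel + 1, arr =>
    let n := arr.length
    if n < 3 then (n : Int)
    else minSizeRecGo k (fun a => minSizeRecF k fuel a) arr (List.range (n - 2)) (n : Int)

def minSizeRec (arr : List Int) (k : Int) : Int :=
  minSizeRecF k (arr.length + 1) arr

-- ===== PORT B =====
-- one BFS level: nxt = set(); for cur in frontier: for i: if triple: nxt.add(...)
def altNext (k : Int) (frontier : List (List Int)) : PySem.Set (List Int) :=
  frontier.foldl (fun nxt cur =>
    (List.range (cur.length - 2)).foldl (fun (nxt : PySem.Set (List Int)) (i : Nat) =>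
      if PySem.List.pyGetD cur ((i : Int) + 1) 0 - PySem.List.pyGetD cur (i : Int) 0 = k ∧
         PySem.List.pyGetD cur ((i : Int) + 2) 0 - PySem.List.pyGetD cur ((i : Int) + 1) 0 = k then
        PySem.Set.add nxt (PySem.List.slice cur none (some (i : Int)) ++
          PySem.List.slice cur (some ((i : Int) + 3)) none)
      else nxt) nxt) PySem.Set.empty

-- the 'for _ in range(len(arr) // 3)' loop: recompute the frontier level by
-- level, subtracting 3 per level (at most len(arr) // 3 levels are possible)
def altLoop (k : Int) : Nat -> List (List Int) -> Int -> Int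
  | 0, _, size => size
  | fuel + 1, frontier, size =>
    let nxt := altNext k frontier
    if nxt = [] then size
    else altLoop k fuel nxt (size - 3)

def minSizeRec_alt (arr : List Int) (k : Int) : Int :=
  altLoop k (arr.length / 3) (PySem.Set.ofList [arr]) (arr.length : Int)

-- ===== PRECONDITION & SPEC =====
def Spec_minSizeRec (arr : List Int) (k : Int) (out : Int) : Prop := out = minSizeRec_alt arr k
instance (arr : List Int) (k : Int) (out : Int) : Decidable (Spec_minSizeRec arr k out) := by unfold Spec_minSizeRec; infer_instance

-- ===== CLAIM (what is proved, stated in full; the proofs are below) =====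
def Claim_equal_minSizeRec : Prop := ∀ (arr : List Int) (k : Int), Dom_minSizeRec arr k → Spec_minSizeRec arr k (minSizeRec arr k)

-- ===== LEMMAS AND PROOFS =====

-- the one-step successors of an array (the arrays A recurses on, = one removal)
def succs (k : Int) (arr : List Int) : List (List Int) :=
  (List.range (arr.length - 2)).filterMap (fun (i : Nat) =>
    if PySem.List.pyGetD arr ((i : Int) + 1) 0 - PySem.List.pyGetD arr (i : Int) 0 = k ∧
       PySem.List.pyGetD arr ((i : Int) + 2) 0 - PySem.List.pyGetD arr ((i : Int) + 1) 0 = k then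
      some (if (i : Int) + 3 < (arr.length : Int) then
          PySem.List.slice arr none (some (i : Int)) ++
            PySem.List.slice arr (some ((i : Int) + 3)) none
        else PySem.List.slice arr none (some (i : Int)))
    else none)

theorem newA_eq {cur : List Int} {i : Nat} :
    (if (i : Int) + 3 < (cur.length : Int) then
        PySem.List.slice cur none (some (i : Int)) ++
          PySem.List.slice cur (some ((i : Int) + 3)) none
      else PySem.List.slice cur none (some (i : Int))) =
    PySem.List.slice cur none (some (i : Int)) ++
      PySem.List.slice cur (some ((i : Int) + 3)) none := by
  split <;> rename_i hlt
  · rfl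
  · have h3 : cur.length ≤ i + 3 := by by_contra h; exact hlt (by omega)
    rw [show ((i : Int) + 3) = ((i + 3 : Nat) : Int) by push_cast; ring,
        PySem.List.slice_from_natCast, List.drop_eq_nil_of_le h3, List.append_nil]

theorem length_mem_succs {k : Int} {arr b : List Int} (hb : b ∈ succs k arr) :
    b.length + 3 = arr.length := by
  rcases List.mem_filterMap.1 hb with ⟨i, hi, hf⟩
  have hi' := List.mem_range.1 hi
  split at hf
  · rcases Option.some_injective _ hf.symm with rfl
    rw [newA_eq]
    simp only [PySem.List.slice_to_natCast, List.length_append,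
      show ((i : Int) + 3) = ((i + 3 : Nat) : Int) by push_cast; ring,
      PySem.List.slice_from_natCast, List.length_take, List.length_drop]
    omega
  · cases hf

-- maximal number of removal levels below arr
def depth (k : Int) (arr : List Int) : Nat :=
  (succs k arr).attach.foldl (fun a b => max a (depth k b.1 + 1)) 0
termination_by arr.length
decreasing_by
  have := length_mem_succs b.2
  omega

theorem depth_eq (k : Int) (arr : List Int) :
    depth k arr = (succs k arr).foldl (fun a b => max a (depth k b + 1)) 0 := by
  rw [depth]
  exact List.foldl_attach (f := fun a b => max a (depth k b + 1)) (b := 0)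

-- A's loop is a fold of min over the index list
theorem go_spec (k : Int) (rec : List Int → Int) (arr : List Int) :
    ∀ (is : List Nat) (mi : Int),
    minSizeRecGo k rec arr is mi = is.foldl
      (fun (m : Int) (j : Nat) =>
        if PySem.List.pyGetD arr ((j : Int) + 1) 0 - PySem.List.pyGetD arr (j : Int) 0 = k ∧
           PySem.List.pyGetD arr ((j : Int) + 2) 0 - PySem.List.pyGetD arr ((j : Int) + 1) 0 = k then
          min m (rec (if (j : Int) + 3 < (arr.length : Int) then
              PySem.List.slice arr none (some (j : Int)) ++
                PySem.List.slice arr (some ((j : Int) + 3)) none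
            else PySem.List.slice arr none (some (j : Int))))
        else m) mi := by
  intro is
  induction is with
  | nil => intro mi; rfl
  | cons i rest ih =>
    intro mi
    rw [minSizeRecGo, List.foldl_cons]
    exact ih _

-- fold over 'filterMap (if c then some (v a) else none)' is the guarded fold
theorem foldl_filterMap_if {α β γ : Type} (l : List α) (c : α → Prop) [DecidablePred c]
    (v : α → β) (g : γ → β → γ) (init : γ) :
    (l.filterMap (fun a => if c a then some (v a) else none)).foldl g init =
      l.foldl (fun acc a => if c a then g acc (v a) else acc) init := by
  rw [List.foldl_filterMap]
  congr 1
  funext acc a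
  by_cases hc : c a <;> simp [hc]

-- running min of N - 3*(f b + 1) versus running max of (f b + 1)
theorem fold_min_max (N : Int) (f : List Int → Nat) : ∀ (L : List (List Int)) (a : Nat),
    L.foldl (fun m b => min m (N - 3 * ((f b : Nat) + 1 : Nat))) (N - 3 * (a : Nat)) =
      N - 3 * ((L.foldl (fun c b => max c (f b + 1)) a : Nat) : Int) := by
  intro L
  induction L with
  | nil => intro a; simp
  | cons b t ih =>
    intro a
    rw [List.foldl_cons, List.foldl_cons,
        show min (N - 3 * (a : Nat)) (N - 3 * ((f b : Nat) + 1 : Nat)) =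
          N - 3 * ((max a (f b + 1) : Nat) : Int) by push_cast; omega]
    exact ih (max a (f b + 1))

theorem fold_min_max0 (N : Int) (f : List Int → Nat) (L : List (List Int)) :
    L.foldl (fun m b => min m (N - 3 * ((f b + 1 : Nat) : Int))) N =
      N - 3 * ((L.foldl (fun c b => max c (f b + 1)) 0 : Nat) : Int) := by
  have h := fold_min_max N f L 0
  simpa using h

theorem minSizeRecF_eq_depth (k : Int) : ∀ (fuel : Nat) (arr : List Int),
    arr.length < fuel →
    minSizeRecF k fuel arr = (arr.length : Int) - 3 * (depth k arr : Int) := by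
  intro fuel
  induction fuel with
  | zero => intro arr h; omega
  | succ fuel IH =>
    intro arr hfuel
    rw [minSizeRecF]
    split <;> rename_i hlen
    · have hs : succs k arr = [] := by
        unfold succs
        rw [show arr.length - 2 = 0 by omega]
        rfl
      rw [depth_eq, hs]
      simp
    · rw [go_spec k _ arr (List.range (arr.length - 2)) ((arr.length : Nat) : Int),
          ← foldl_filterMap_if (List.range (arr.length - 2))
            (fun (i : Nat) =>
              PySem.List.pyGetD arr ((i : Int) + 1) 0 - PySem.List.pyGetD arr (i : Int) 0 = k ∧
              PySem.List.pyGetD arr ((i : Int) + 2) 0 - PySem.List.pyGetD arr ((i : Int) + 1) 0 = k)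
            (fun (i : Nat) =>
              if (i : Int) + 3 < (arr.length : Int) then
                PySem.List.slice arr none (some (i : Int)) ++
                  PySem.List.slice arr (some ((i : Int) + 3)) none
              else PySem.List.slice arr none (some (i : Int)))
            (fun m b => min m (minSizeRecF k fuel b)) ((arr.length : Nat) : Int)]
      rw [show ((List.range (arr.length - 2)).filterMap fun (i : Nat) =>
            if PySem.List.pyGetD arr ((i : Int) + 1) 0 - PySem.List.pyGetD arr (i : Int) 0 = k ∧
               PySem.List.pyGetD arr ((i : Int) + 2) 0 - PySem.List.pyGetD arr ((i : Int) + 1) 0 = k then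
              some (if (i : Int) + 3 < (arr.length : Int) then
                  PySem.List.slice arr none (some (i : Int)) ++
                    PySem.List.slice arr (some ((i : Int) + 3)) none
                else PySem.List.slice arr none (some (i : Int)))
            else none) = succs k arr from rfl]
      rw [PySem.List.foldl_congr_mem (succs k arr) _
            (fun m b => min m ((arr.length : Int) - 3 * ((depth k b + 1 : Nat) : Int)))
            ((arr.length : Nat) : Int)
            (by
              intro acc b hb
              have hl := length_mem_succs hb
              rw [IH b (by omega)]
              congr 1
              push_cast
              omega),
          fold_min_max0, ← depth_eq]

theorem minSizeRec_eq_depth (arr : List Int) (k : Int) :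
    minSizeRec arr k = (arr.length : Int) - 3 * (depth k arr : Int) := by
  rw [minSizeRec]
  exact minSizeRecF_eq_depth k (arr.length + 1) arr (by omega)

theorem mem_inner_foldl {k : Int} {cur y : List Int} {s : PySem.Set (List Int)} {l : List Nat} :
    y ∈ l.foldl (fun (nxt : PySem.Set (List Int)) (i : Nat) =>
      if PySem.List.pyGetD cur ((i : Int) + 1) 0 - PySem.List.pyGetD cur (i : Int) 0 = k ∧
         PySem.List.pyGetD cur ((i : Int) + 2) 0 - PySem.List.pyGetD cur ((i : Int) + 1) 0 = k then
        PySem.Set.add nxt (PySem.List.slice cur none (some (i : Int)) ++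
          PySem.List.slice cur (some ((i : Int) + 3)) none)
      else nxt) s ↔
    y ∈ s ∨ ∃ i ∈ l,
      (PySem.List.pyGetD cur ((i : Int) + 1) 0 - PySem.List.pyGetD cur (i : Int) 0 = k ∧
       PySem.List.pyGetD cur ((i : Int) + 2) 0 - PySem.List.pyGetD cur ((i : Int) + 1) 0 = k) ∧
      y = PySem.List.slice cur none (some (i : Int)) ++
          PySem.List.slice cur (some ((i : Int) + 3)) none := by
  induction l generalizing s with
  | nil => simp only [List.foldl_nil, List.not_mem_nil]; tauto
  | cons i t ih =>
    simp only [List.foldl_cons, ih]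
    split <;> rename_i hc
    · rw [PySem.Set.mem_add]
      constructor
      · rintro ((hy | hy) | hy)
        · exact Or.inl hy
        · exact Or.inr ⟨i, by simp, hc, hy⟩
        · rcases hy with ⟨j, hj, hjc, hjy⟩; exact Or.inr ⟨j, by simp [hj], hjc, hjy⟩
      · rintro (hy | ⟨j, hj, hjc, hjy⟩)
        · exact Or.inl (Or.inl hy)
        · rcases List.mem_cons.1 hj with rfl | hj
          · exact Or.inl (Or.inr hjy)
          · exact Or.inr ⟨j, hj, hjc, hjy⟩
    · constructor
      · rintro (hy | ⟨j, hj, hjc, hjy⟩)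
        · exact Or.inl hy
        · exact Or.inr ⟨j, by simp [hj], hjc, hjy⟩
      · rintro (hy | ⟨j, hj, hjc, hjy⟩)
        · exact Or.inl hy
        · rcases List.mem_cons.1 hj with rfl | hj
          · exact absurd hjc hc
          · exact Or.inr ⟨j, hj, hjc, hjy⟩

theorem mem_altNext {k : Int} {F : List (List Int)} {y : List Int} :
    y ∈ altNext k F ↔ ∃ cur ∈ F, ∃ i ∈ List.range (cur.length - 2),
      (PySem.List.pyGetD cur ((i : Int) + 1) 0 - PySem.List.pyGetD cur (i : Int) 0 = k ∧
       PySem.List.pyGetD cur ((i : Int) + 2) 0 - PySem.List.pyGetD cur ((i : Int) + 1) 0 = k) ∧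
      y = PySem.List.slice cur none (some (i : Int)) ++
          PySem.List.slice cur (some ((i : Int) + 3)) none := by
  unfold altNext
  have gen : ∀ (G : List (List Int)) (s : PySem.Set (List Int)),
      y ∈ G.foldl (fun nxt cur =>
        (List.range (cur.length - 2)).foldl (fun (nxt : PySem.Set (List Int)) (i : Nat) =>
          if PySem.List.pyGetD cur ((i : Int) + 1) 0 - PySem.List.pyGetD cur (i : Int) 0 = k ∧
             PySem.List.pyGetD cur ((i : Int) + 2) 0 - PySem.List.pyGetD cur ((i : Int) + 1) 0 = k then
            PySem.Set.add nxt (PySem.List.slice cur none (some (i : Int)) ++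
              PySem.List.slice cur (some ((i : Int) + 3)) none)
          else nxt) nxt) s ↔
      y ∈ s ∨ ∃ cur ∈ G, ∃ i ∈ List.range (cur.length - 2),
        (PySem.List.pyGetD cur ((i : Int) + 1) 0 - PySem.List.pyGetD cur (i : Int) 0 = k ∧
         PySem.List.pyGetD cur ((i : Int) + 2) 0 - PySem.List.pyGetD cur ((i : Int) + 1) 0 = k) ∧
        y = PySem.List.slice cur none (some (i : Int)) ++
            PySem.List.slice cur (some ((i : Int) + 3)) none := by
    intro G
    induction G with
    | nil => simp only [List.foldl_nil, List.not_mem_nil]; tauto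
    | cons c t ih =>
      intro s
      simp only [List.foldl_cons, ih, mem_inner_foldl]
      constructor
      · rintro ((hy | hy) | hy)
        · exact Or.inl hy
        · exact Or.inr ⟨c, by simp, hy⟩
        · rcases hy with ⟨cur, hcur, hrest⟩; exact Or.inr ⟨cur, by simp [hcur], hrest⟩
      · rintro (hy | ⟨cur, hcur, hrest⟩)
        · exact Or.inl (Or.inl hy)
        · rcases List.mem_cons.1 hcur with rfl | hcur
          · exact Or.inl (Or.inr hrest)
          · exact Or.inr ⟨cur, hcur, hrest⟩
  simpa using gen F PySem.Set.empty

-- membership in one BFS level = membership in some frontier member's succs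
theorem mem_altNext_succs {k : Int} {F : List (List Int)} {y : List Int} :
    y ∈ altNext k F ↔ ∃ cur ∈ F, y ∈ succs k cur := by
  rw [mem_altNext]
  refine exists_congr fun cur => and_congr_right fun _ => ?_
  unfold succs
  rw [List.mem_filterMap]
  refine exists_congr fun i => and_congr_right fun hi => ?_
  have hi' := List.mem_range.1 hi
  constructor
  · rintro ⟨hc, rfl⟩
    rw [if_pos hc, newA_eq]
  · intro hf
    split at hf <;> rename_i hc
    · rcases Option.some_injective _ hf with rfl
      exact ⟨hc, newA_eq⟩
    · cases hf

-- bounding a running max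
theorem foldl_max_le {f : List Int → Nat} {c : Nat} :
    ∀ (L : List (List Int)) (a : Nat), a ≤ c → (∀ b ∈ L, f b ≤ c) →
      L.foldl (fun a b => max a (f b)) a ≤ c := by
  intro L
  induction L with
  | nil => intro a ha _; simpa using ha
  | cons b t ih =>
    intro a ha h
    rw [List.foldl_cons]
    exact ih _ (by have := h b (by simp); omega) (fun x hx => h x (by simp [hx]))

theorem foldl_max_lt {f : List Int → Nat} {c : Nat} :
    ∀ (L : List (List Int)) (a : Nat), a < c → (∀ b ∈ L, f b < c) →
      L.foldl (fun a b => max a (f b)) a < c := by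
  intro L
  induction L with
  | nil => intro a ha _; simpa using ha
  | cons b t ih =>
    intro a ha h
    rw [List.foldl_cons]
    exact ih _ (by have := h b (by simp); omega) (fun x hx => h x (by simp [hx]))

theorem depth_le (k : Int) : ∀ (n : Nat) (arr : List Int), arr.length = n →
    depth k arr ≤ arr.length / 3 := by
  intro n
  induction n using Nat.strong_induction_on with
  | _ n IH =>
    intro arr hn
    subst hn
    rw [depth_eq]
    refine foldl_max_le _ 0 (Nat.zero_le _) fun b hb => ?_
    have hl := length_mem_succs hb
    have hle := IH b.length (by omega) b rfl
    omega

theorem altLoop_eq (k : Int) : ∀ (fuel : Nat) (F : List (List Int)) (size : Int),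
    (∀ b ∈ F, depth k b ≤ fuel) →
    altLoop k fuel F size = size - 3 * (F.foldl (fun a b => max a (depth k b)) 0 : Nat) := by
  intro fuel
  induction fuel with
  | zero =>
    intro F size hd
    have hz : F.foldl (fun a b => max a (depth k b)) 0 = 0 :=
      Nat.le_zero.1 (foldl_max_le F 0 le_rfl hd)
    simp [altLoop, hz]
  | succ fuel ih =>
    intro F size hd
    simp only [altLoop]
    split <;> rename_i h
    · have hz : F.foldl (fun a b => max a (depth k b)) 0 = 0 := by
        refine Nat.le_zero.1 (foldl_max_le F 0 le_rfl fun cur hcur => ?_)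
        have hs : succs k cur = [] := by
          cases hsc : succs k cur with
          | nil => rfl
          | cons b t =>
            have hb : b ∈ altNext k F :=
              mem_altNext_succs.2 ⟨cur, hcur, by rw [hsc]; exact List.mem_cons_self ..⟩
            rw [h] at hb
            cases hb
        rw [depth_eq, hs]
        simp
      simp [hz]
    · have hdepth_le : ∀ b ∈ altNext k F, ∀ cur ∈ F, b ∈ succs k cur →
          depth k b + 1 ≤ depth k cur := by
        intro b _ cur _ hbs
        rw [depth_eq k cur]
        exact (PySem.List.le_foldl_max_nat (succs k cur) (fun b => depth k b + 1) 0).2 b hbs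
      rw [ih (altNext k F) (size - 3) (by
        intro b hb
        rcases mem_altNext_succs.1 hb with ⟨cur, hcur, hbs⟩
        have h1 := hdepth_le b hb cur hcur hbs
        have h2 := hd cur hcur
        omega)]
      have key : F.foldl (fun a b => max a (depth k b)) 0 =
          (altNext k F).foldl (fun a b => max a (depth k b)) 0 + 1 := by
        set Mn := (altNext k F).foldl (fun a b => max a (depth k b)) 0 with hMn
        set MF := F.foldl (fun a b => max a (depth k b)) 0 with hMF
        refine Nat.le_antisymm ?_ ?_
        · refine foldl_max_le F 0 (by omega) fun cur hcur => ?_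
          rw [depth_eq]
          refine foldl_max_le _ 0 (by omega) fun b hb => ?_
          have : depth k b ≤ Mn :=
            (PySem.List.le_foldl_max_nat (altNext k F) (depth k) 0).2 b
              (mem_altNext_succs.2 ⟨cur, hcur, hb⟩)
          omega
        · have hb_lt : ∀ b ∈ altNext k F, depth k b < MF := by
            intro b hb
            rcases mem_altNext_succs.1 hb with ⟨cur, hcur, hbs⟩
            have h1 := hdepth_le b hb cur hcur hbs
            have h2 := (PySem.List.le_foldl_max_nat F (depth k) 0).2 cur hcur
            omega
          have h0 : 0 < MF := by
            rcases List.exists_mem_of_ne_nil _ h with ⟨b, hb⟩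
            rcases mem_altNext_succs.1 hb with ⟨cur, hcur, hbs⟩
            have h1 := hdepth_le b hb cur hcur hbs
            have h2 := (PySem.List.le_foldl_max_nat F (depth k) 0).2 cur hcur
            omega
          have := foldl_max_lt (altNext k F) 0 h0 hb_lt
          omega
      rw [key]
      push_cast
      ring

-- ===== VERDICT (by name: the statement is the Claim_ definition above) =====
theorem minSizeRec_spec : Claim_equal_minSizeRec := by
  intro arr k _
  show minSizeRec arr k = minSizeRec_alt arr k
  have h1 : PySem.Set.ofList [arr] = [arr] := by
    simp [PySem.Set.ofList_cons, PySem.Set.ofList_nil, PySem.Set.discard]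
  rw [minSizeRec_eq_depth, minSizeRec_alt, h1,
      altLoop_eq k (arr.length / 3) [arr] (arr.length : Int)
        (by
          intro b hb
          rw [List.mem_singleton] at hb
          subst hb
          exact depth_le k b.length b rfl)]
  simp
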